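-- pv_equiv track=rewrite | github.com/geitner-max/Advent-of-Code-2023 | day_13_point_of_incidence/day_13.py | is_valid_column_reflection
-- ===== SOURCE A (Python) =====
-- def is_valid_column_reflection(level, start_col_index):
--     rows_inner = len(level)
--     cols_inner = len(level[0])
--
--     second_col = start_col_index + 1
--
-- # for second_col in range(start_col_index + 1, cols_inner):
--     for offset in range(0, cols_inner):
--
--         if start_col_index - offset < 0 or second_col + offset >= cols_inner:
--             return True
--
--         for j in range(rows_inner):
--             if level[j][start_col_index - offset] != level[j][second_col + offset]:
--                 return False
-- ===== SOURCE B (Python) =====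
-- def is_valid_column_reflection(level, start_col_index):
--     cols = len(level[0])
--     # number of column pairs that actually overlap around the axis, in closed form
--     w = max(0, min(start_col_index + 1, cols - start_col_index - 1))
--     mid = start_col_index + 1
--     # the axis is valid iff, in every row, the w columns left of it read backwards
--     # equal the w columns right of it
--     return all(row[mid - w:mid] == row[mid:mid + w][::-1] for row in level)
-- ===== Notes on version B (the rewrite author's own statement) =====
-- stated objective: simpler
-- what changed: B computes the overlap width around the axis in closed form and reduces the whole check to one slice comparison per row (left slice == reversed right slice), removing A's offset loop, its per-cell inner loop and its in-loop bound checks.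
-- outside the precondition, e.g. on is_valid_column_reflection([''], 0): A returns None, B returns True; on is_valid_column_reflection(['ab', 'a'], 0): A returns False, B returns False
import Mathlib
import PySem

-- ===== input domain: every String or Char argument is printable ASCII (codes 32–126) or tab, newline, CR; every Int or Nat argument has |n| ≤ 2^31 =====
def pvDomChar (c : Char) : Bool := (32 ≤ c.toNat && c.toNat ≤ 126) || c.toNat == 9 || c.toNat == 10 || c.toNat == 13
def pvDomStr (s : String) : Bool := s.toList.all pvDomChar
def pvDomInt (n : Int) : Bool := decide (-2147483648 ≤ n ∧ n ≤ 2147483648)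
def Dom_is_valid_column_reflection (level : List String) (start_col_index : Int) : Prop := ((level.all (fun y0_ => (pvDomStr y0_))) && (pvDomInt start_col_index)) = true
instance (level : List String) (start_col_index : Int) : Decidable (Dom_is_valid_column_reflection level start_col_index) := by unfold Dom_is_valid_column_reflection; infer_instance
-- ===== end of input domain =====

-- B replaces A's offset loop (with its nested per-row cell loop and in-loop bound checks) by a
-- closed-form overlap width and ONE slice comparison per row; objective: simpler (same asymptotic cost).

-- ===== PORT A =====
-- inner 'for j in range(rows_inner)' loop: first mismatching row returns False
def pvAInner (li ri : Int) : List String → Bool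
  | [] => true
  | s :: rest =>
    if PySem.Str.pyGet? s li ≠ PySem.Str.pyGet? s ri then false else pvAInner li ri rest

-- outer 'for offset in range(0, cols_inner)' loop; fuel = remaining offsets;
-- falling off the loop end is Python's 'return None' (only when cols_inner = 0, outside Pre_): port returns false there
def pvALoop (level : List String) (cols start : Int) : Nat → Int → Bool
  | 0, _ => false
  | n + 1, offset =>
    if start - offset < 0 ∨ start + 1 + offset ≥ cols then true
    else if pvAInner (start - offset) (start + 1 + offset) level then pvALoop level cols start n (offset + 1)
    else false

def is_valid_column_reflection (level : List String) (start_col_index : Int) : Bool :=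
  let cols : Int := PySem.Str.len ((PySem.List.pyGet? level 0).getD "")
  pvALoop level cols start_col_index cols.toNat 0

-- ===== PORT B =====
-- Source B's per-row test 'row[mid - w:mid] == row[mid:mid + w][::-1]': string slices are the List
-- slices on code points, and s[::-1] is List.reverse (PySem.List.slice?_none_none_neg_one)
def pvBRow (w mid : Int) (row : String) : Bool :=
  PySem.List.slice row.toList (some (mid - w)) (some mid)
    == (PySem.List.slice row.toList (some mid) (some (mid + w))).reverse

def is_valid_column_reflection_alt (level : List String) (start_col_index : Int) : Bool :=
  let cols : Int := PySem.Str.len ((PySem.List.pyGet? level 0).getD "")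
  let w : Int := max 0 (min (start_col_index + 1) (cols - start_col_index - 1))
  let mid : Int := start_col_index + 1
  level.all (pvBRow w mid)

-- ===== PRECONDITION & SPEC =====
-- Pre_ excludes: the empty list (A raises IndexError), an empty first row (A falls off its loop and
-- returns None, not a bool), and grids where some row is too short for the nonempty mirror window
-- around the axis (indexing may raise IndexError in A; on some such inputs A still returns a bool — see cites).
def Pre_is_valid_column_reflection (level : List String) (start_col_index : Int) : Prop :=
  level ≠ [] ∧ 1 ≤ PySem.Str.len (level.headD "") ∧
    (0 < min (start_col_index + 1) (PySem.Str.len (level.headD "") - start_col_index - 1) →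
      ∀ s ∈ level,
        start_col_index + 1 + min (start_col_index + 1) (PySem.Str.len (level.headD "") - start_col_index - 1)
          ≤ PySem.Str.len s)
instance (level : List String) (start_col_index : Int) : Decidable (Pre_is_valid_column_reflection level start_col_index) := by unfold Pre_is_valid_column_reflection; infer_instance

def pvWitness_is_valid_column_reflection : List String × Int := (["#.#", "..."], 1)

def Spec_is_valid_column_reflection (level : List String) (start_col_index : Int) (out : Bool) : Prop := out = is_valid_column_reflection_alt level start_col_index
instance (level : List String) (start_col_index : Int) (out : Bool) : Decidable (Spec_is_valid_column_reflection level start_col_index out) := by unfold Spec_is_valid_column_reflection; infer_instance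

-- ===== CLAIM (what is proved, stated in full; the proofs are below) =====
def Claim_equal_is_valid_column_reflection : Prop := ∀ (level : List String) (start_col_index : Int), Dom_is_valid_column_reflection level start_col_index → Pre_is_valid_column_reflection level start_col_index → Spec_is_valid_column_reflection level start_col_index (is_valid_column_reflection level start_col_index)

-- ===== LEMMAS AND PROOFS =====

-- A's inner row loop is an 'all' over the rows
lemma pvAInner_eq_all (li ri : Int) (level : List String) :
    pvAInner li ri level = level.all (fun s => PySem.Str.pyGet? s li == PySem.Str.pyGet? s ri) := by
  induction level with
  | nil => rfl
  | cons s rest ih =>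
    by_cases h : PySem.Str.pyGet? s li = PySem.Str.pyGet? s ri
    · rw [pvAInner, if_neg (by simpa using h), ih, List.all_cons,
        show ((PySem.Str.pyGet? s li == PySem.Str.pyGet? s ri) = true) from beq_iff_eq.mpr h]
      simp
    · rw [pvAInner, if_pos (by simpa using h), List.all_cons,
        show ((PySem.Str.pyGet? s li == PySem.Str.pyGet? s ri) = false) from beq_eq_false_iff_ne.mpr h]
      simp

-- A's outer loop is true iff every still-reachable in-overlap offset passes the row check
lemma pvALoop_true_iff (level : List String) (cols start : Int) :
    ∀ (n : Nat) (offset : Int), 0 ≤ offset →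
      (∃ k : Nat, k < n ∧ (start - (offset + k) < 0 ∨ start + 1 + (offset + k) ≥ cols)) →
      (pvALoop level cols start n offset = true ↔
        ∀ j : Int, offset ≤ j → 0 ≤ start - j → start + 1 + j < cols →
          pvAInner (start - j) (start + 1 + j) level = true) := by
  intro n
  induction n with
  | zero => intro _ _ hk; exact absurd hk (by simp)
  | succ n ih =>
    intro offset hoff hk
    by_cases hexit : start - offset < 0 ∨ start + 1 + offset ≥ cols
    · rw [pvALoop, if_pos hexit]
      constructor
      · intro _ j hj h1 h2; exfalso; omega
      · intro _; rfl
    · push_neg at hexit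
      rw [pvALoop, if_neg (by omega)]
      by_cases hin : pvAInner (start - offset) (start + 1 + offset) level = true
      · rw [if_pos hin]
        have hrec := ih (offset + 1) (by omega) ?_
        · rw [hrec]
          constructor
          · intro h j hj h1 h2
            rcases eq_or_lt_of_le hj with rfl | hlt
            · exact hin
            · exact h j (by omega) h1 h2
          · intro h j hj h1 h2; exact h j (by omega) h1 h2
        · obtain ⟨k, hkn, hkc⟩ := hk
          have hk0 : k ≠ 0 := by rintro rfl; simp at hkc; omega
          refine ⟨k - 1, by omega, ?_⟩
          have : (offset + 1 + (k - 1 : Nat) : Int) = offset + k := by omega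
          rw [this]; exact hkc
      · rw [if_neg hin]
        simp only [Bool.false_eq_true, false_iff]
        intro h
        exact hin (h offset (le_refl _) (by omega) (by omega))

-- per-row: the slice comparison is the pointwise mirrored-cell comparison
lemma pvBRow_iff (start cols : Int) (s : String)
    (hlen : 0 < min (start + 1) (cols - start - 1) →
      start + 1 + min (start + 1) (cols - start - 1) ≤ PySem.Str.len s) :
    (pvBRow (max 0 (min (start + 1) (cols - start - 1))) (start + 1) s = true ↔
      ∀ k : Nat, (k : Int) < max 0 (min (start + 1) (cols - start - 1)) →
        PySem.Str.pyGet? s (start - k) = PySem.Str.pyGet? s (start + 1 + k)) := by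
  have hcs : PySem.Str.len s = (s.toList.length : Int) := by simp [PySem.Str.len_eq]
  rcases le_or_gt (min (start + 1) (cols - start - 1)) 0 with hw0 | hwpos
  · have hmax : max 0 (min (start + 1) (cols - start - 1)) = 0 := by omega
    rw [hmax]
    have hnil : PySem.List.slice s.toList (some (start + 1)) (some (start + 1)) = [] := by
      apply List.eq_nil_of_length_eq_zero
      rw [PySem.List.length_slice]
      omega
    constructor
    · intro _ k hk; exfalso; omega
    · intro _; unfold pvBRow; rw [beq_iff_eq, sub_zero, add_zero, hnil]; rfl
  · have hmax : max 0 (min (start + 1) (cols - start - 1)) = min (start + 1) (cols - start - 1) := by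
      omega
    rw [hmax]
    set v := min (start + 1) (cols - start - 1) with hv
    have h1 : 0 ≤ start + 1 - v := by omega
    have h2 : 0 ≤ start + 1 := by omega
    have h3 : 0 ≤ start + 1 + v := by omega
    have hl := hlen hwpos
    rw [hcs] at hl
    set cs := s.toList with hcsdef
    set W := v.toNat with hW
    set m := (start + 1).toNat with hm
    have hWm : W ≤ m := by omega
    have hmWL : m + W ≤ cs.length := by omega
    have hleft : PySem.List.slice cs (some (start + 1 - v)) (some (start + 1))
        = (cs.drop (m - W)).take W := by
      rw [PySem.List.slice_toNat _ h1 h2]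
      congr 1
      · omega
      · congr 1; omega
    have hright : PySem.List.slice cs (some (start + 1)) (some (start + 1 + v))
        = (cs.drop m).take W := by
      rw [PySem.List.slice_toNat _ h2 h3]
      congr 1
      omega
    have htlen : (List.take W (List.drop m cs)).length = W := by simp; omega
    have hllen : ((cs.drop (m - W)).take W).length = W := by simp; omega
    have hrlen : (((cs.drop m).take W).reverse).length = W := by simp; omega
    have hcast : (∀ k : Nat, (k : Int) < v →
          PySem.Str.pyGet? s (start - k) = PySem.Str.pyGet? s (start + 1 + k))
        ↔ (∀ k : Nat, k < W → cs[m - 1 - k]? = cs[m + k]?) := by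
      constructor
      · intro h k hkW
        have h' := h k (by omega)
        rw [show start - (k : Int) = ((m - 1 - k : Nat) : Int) by omega,
            show start + 1 + (k : Int) = ((m + k : Nat) : Int) by omega,
            PySem.Str.pyGet?_natCast, PySem.Str.pyGet?_natCast] at h'
        exact h'
      · intro h k hkv
        have h' := h k (by omega)
        rw [show start - (k : Int) = ((m - 1 - k : Nat) : Int) by omega,
            show start + 1 + (k : Int) = ((m + k : Nat) : Int) by omega,
            PySem.Str.pyGet?_natCast, PySem.Str.pyGet?_natCast]
        exact h'
    rw [hcast]
    unfold pvBRow
    rw [beq_iff_eq, hleft, hright]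
    have hl? : ∀ i : Nat, i < W → ((cs.drop (m - W)).take W)[i]? = cs[m - W + i]? := by
      intro i hi
      simp only [List.getElem?_take, List.getElem?_drop]
      rw [if_pos hi]
    have hr? : ∀ i : Nat, i < W → (((cs.drop m).take W).reverse)[i]? = cs[m + (W - 1 - i)]? := by
      intro i hi
      rw [List.getElem?_reverse (by rw [htlen]; omega), htlen]
      simp only [List.getElem?_take, List.getElem?_drop]
      rw [if_pos (by omega)]
    constructor
    · intro heq k hkW
      have e : ((cs.drop (m - W)).take W)[W - 1 - k]? = (((cs.drop m).take W).reverse)[W - 1 - k]? := by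
        rw [heq]
      rw [hl? _ (by omega), hr? _ (by omega)] at e
      rw [show m - W + (W - 1 - k) = m - 1 - k by omega,
          show W - 1 - (W - 1 - k) = k by omega] at e
      exact e
    · intro h
      apply List.ext_getElem?
      intro i
      by_cases hiW : i < W
      · rw [hl? _ hiW, hr? _ hiW, show m - W + i = m - 1 - (W - 1 - i) by omega]
        exact h (W - 1 - i) (by omega)
      · rw [List.getElem?_eq_none (by rw [hllen]; omega), List.getElem?_eq_none (by rw [hrlen]; omega)]

-- ===== VERDICT (by name: the statement is the Claim_ definition above) =====
lemma pv_bool_ext (a b : Bool) (h : a = true ↔ b = true) : a = b := by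
  cases a <;> cases b <;> simp_all

theorem is_valid_column_reflection_spec : Claim_equal_is_valid_column_reflection := by
  intro level start _ hpre
  obtain ⟨hne, hcols, hrows⟩ := hpre
  obtain ⟨s0, rest, rfl⟩ : ∃ s0 rest, level = s0 :: rest := by
    cases level with
    | nil => exact absurd rfl hne
    | cons a l => exact ⟨a, l, rfl⟩
  simp only [List.headD_cons] at hcols hrows
  unfold Spec_is_valid_column_reflection is_valid_column_reflection is_valid_column_reflection_alt
  have h0 : PySem.List.pyGet? (s0 :: rest) (0 : Int) = some s0 := by
    simp [PySem.List.pyGet?, PySem.List.pyIdx?]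
  rw [h0]
  simp only [Option.getD_some]
  set cols : Int := PySem.Str.len s0 with hC
  apply pv_bool_ext
  have hexit : ∃ k : Nat, k < cols.toNat ∧
      (start - ((0 : Int) + k) < 0 ∨ start + 1 + ((0 : Int) + k) ≥ cols) := by
    by_cases hneg : start < 0 ∨ cols ≤ start + 1
    · exact ⟨0, by omega, by omega⟩
    · push_neg at hneg
      exact ⟨(min (start + 1) (cols - 1 - start)).toNat, by omega, by omega⟩
  rw [pvALoop_true_iff (s0 :: rest) cols start cols.toNat 0 le_rfl hexit, List.all_eq_true]
  constructor
  · intro hA s hs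
    rw [pvBRow_iff start cols s (fun hp => hrows hp s hs)]
    intro k hk
    have h := hA k (by omega) (by omega) (by omega)
    rw [pvAInner_eq_all, List.all_eq_true] at h
    exact beq_iff_eq.mp (h s hs)
  · intro hB j h0j h1 h2
    rw [pvAInner_eq_all, List.all_eq_true]
    intro s hs
    have h := (pvBRow_iff start cols s (fun hp => hrows hp s hs)).mp (hB s hs) j.toNat (by omega)
    rw [show ((j.toNat : Nat) : Int) = j by omega] at h
    exact beq_iff_eq.mpr h
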